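-- pv_equiv track=rewrite | github.com/brad-eisenhauer/advent-of-code-2021 | aoc2019/aoc04.py | code_is_valid
-- ===== SOURCE A (Python) =====
-- def code_is_valid(n: int, strict: bool = False) -> bool:
--     # six digit number; no leading zeroes
--     if n not in range(100000, 1000000):
--         return False
--
--     def generate_digits():
--         temp = n
--         while temp > 0:
--             yield temp % 10
--             temp //= 10
--
--     # digits must be monotonically increasing
--     digits = generate_digits()
--     last_digit = next(digits)
--     for next_digit in digits:
--         if next_digit > last_digit:
--             return False
--         last_digit = next_digit
--
--     # number must contain at least two consecutive digits (exactly two if strict)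
--     digits = generate_digits()
--     last_digit = next(digits)
--     consec_count = 1
--     for next_digit in digits:
--         if next_digit == last_digit:
--             consec_count += 1
--             if not strict and consec_count > 1:
--                 break
--         else:
--             if consec_count == 2:
--                 break
--             consec_count = 1
--         last_digit = next_digit
--     else:
--         if consec_count != 2:
--             return False
--
--     return True
-- ===== SOURCE B (Python) =====
-- def _digits_lsb(temp):
--     # least-significant digit first, arithmetic extraction (like A's generator)
--     if temp <= 0:
--         return []
--     return [temp % 10] + _digits_lsb(temp // 10)
--
--
-- def _run_lengths(ds):
--     # lengths of maximal blocks of equal adjacent values, recursively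
--     if not ds:
--         return []
--     if len(ds) == 1:
--         return [1]
--     rest = _run_lengths(ds[1:])
--     if ds[0] == ds[1]:
--         return [rest[0] + 1] + rest[1:]
--     return [1] + rest
--
--
-- def code_is_valid(n, strict=False):
--     if n not in range(100000, 1000000):
--         return False
--     digits = _digits_lsb(n)  # LSB first, so must be non-increasing
--     if digits != sorted(digits, reverse=True):
--         return False
--     lengths = _run_lengths(digits)
--     return (2 in lengths) if strict else any(c >= 2 for c in lengths)
-- ===== Notes on version B (the rewrite author's own statement) =====
-- stated objective: simpler
-- what changed: A's two manual state-machine loops (early-return monotonicity scan and a break/for-else run counter) are replaced by comparing the digit list against its sorted copy and by recursively building the list of run lengths, which is then tested with '2 in lengths' (strict) or 'any length >= 2' (non-strict).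
import Mathlib
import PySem

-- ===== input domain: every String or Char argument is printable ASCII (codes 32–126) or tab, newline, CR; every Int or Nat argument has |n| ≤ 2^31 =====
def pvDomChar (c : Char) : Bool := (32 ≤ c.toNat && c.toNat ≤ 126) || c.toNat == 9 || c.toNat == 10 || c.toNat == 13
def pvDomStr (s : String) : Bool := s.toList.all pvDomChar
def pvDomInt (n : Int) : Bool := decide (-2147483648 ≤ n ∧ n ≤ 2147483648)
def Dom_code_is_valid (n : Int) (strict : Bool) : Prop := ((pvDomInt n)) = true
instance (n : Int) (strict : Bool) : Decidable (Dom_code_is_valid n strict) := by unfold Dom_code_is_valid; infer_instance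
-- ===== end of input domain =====

-- B replaces A's two manual state-machine loops by a sorted-copy comparison plus a
-- recursively built run-length list that is then tested (objective: simpler decomposition).

-- ===== PORT A =====
-- generate_digits(): yields n's decimal digits least-significant first
def genDigits (temp : Int) : List Int :=
  if 0 < temp then PySem.Int.mod temp 10 :: genDigits (PySem.Int.floordiv temp 10) else []
termination_by temp.toNat
decreasing_by
  rename_i h
  rw [PySem.Int.floordiv_eq_ediv_of_pos (by norm_num : (0:Int) < 10)]
  omega

-- first loop: digits must be non-increasing LSB-first (early return False otherwise)
def monoLoopA (last : Int) : List Int → Bool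
  | [] => true
  | d :: ds => if d > last then false else monoLoopA d ds

-- second loop, including the for-else clause (falls off the list: True iff count == 2)
def consecLoopA (strict : Bool) (last count : Int) : List Int → Bool
  | [] => count == 2
  | d :: ds =>
    if d == last then
      if !strict && decide (count + 1 > 1) then true
      else consecLoopA strict d (count + 1) ds
    else
      if count == 2 then true
      else consecLoopA strict d 1 ds

def code_is_valid (n : Int) (strict : Bool) : Bool :=
  if ¬ (100000 ≤ n ∧ n < 1000000) then false
  else
    match genDigits n with
    | [] => false   -- unreachable: n ≥ 100000 > 0, so the generator yields at least one digit
    | d0 :: rest =>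
      if !monoLoopA d0 rest then false
      else consecLoopA strict d0 1 rest

-- ===== PORT B =====
-- _digits_lsb(temp)
def digitsLsb (temp : Int) : List Int :=
  if temp ≤ 0 then []
  else PySem.Int.mod temp 10 :: digitsLsb (PySem.Int.floordiv temp 10)
termination_by temp.toNat
decreasing_by
  rename_i h
  rw [PySem.Int.floordiv_eq_ediv_of_pos (by norm_num : (0:Int) < 10)]
  omega

-- _run_lengths(ds)
def runLengthsB : List Int → List Int
  | [] => []
  | [_] => [1]
  | a :: b :: t =>
    match runLengthsB (b :: t) with
    | c :: cs => if a == b then (c + 1) :: cs else 1 :: c :: cs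
    | [] => [1]   -- unreachable: _run_lengths of a nonempty list is nonempty

def code_is_valid_alt (n : Int) (strict : Bool) : Bool :=
  if ¬ (100000 ≤ n ∧ n < 1000000) then false
  else
    let digits := digitsLsb n
    if digits ≠ PySem.List.sorted digits (fun x => x) true then false
    else
      let lengths := runLengthsB digits
      if strict then lengths.contains 2 else lengths.any (fun c => decide (2 ≤ c))

-- ===== PRECONDITION & SPEC =====
def Spec_code_is_valid (n : Int) (strict : Bool) (out : Bool) : Prop := out = code_is_valid_alt n strict
instance (n : Int) (strict : Bool) (out : Bool) : Decidable (Spec_code_is_valid n strict out) := by unfold Spec_code_is_valid; infer_instance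

-- ===== CLAIM (what is proved, stated in full; the proofs are below) =====
def Claim_equal_code_is_valid : Prop := ∀ (n : Int) (strict : Bool), Dom_code_is_valid n strict → Spec_code_is_valid n strict (code_is_valid n strict)

-- ===== LEMMAS AND PROOFS =====

-- the two digit extractions agree
theorem digitsLsb_eq_genDigits (t : Int) : digitsLsb t = genDigits t := by
  rw [digitsLsb, genDigits]
  split
  · rename_i h; rw [if_neg (by omega)]
  · rename_i h
    rw [if_pos (by omega), digitsLsb_eq_genDigits (PySem.Int.floordiv t 10)]
termination_by t.toNat
decreasing_by
  rw [PySem.Int.floordiv_eq_ediv_of_pos (by norm_num : (0:Int) < 10)]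
  omega

theorem genDigits_ne_nil (t : Int) (h : 0 < t) : genDigits t ≠ [] := by
  rw [genDigits, if_pos h]; simp

-- A's first loop is the non-increasing-chain test
theorem monoLoopA_eq_chain (l : List Int) : ∀ last, monoLoopA last l = true ↔ List.IsChain (fun a b => b ≤ a) (last :: l) := by
  induction l with
  | nil => intro last; simpa [monoLoopA] using List.IsChain.singleton last
  | cons d ds ih =>
    intro last
    rw [monoLoopA]
    by_cases h : d > last
    · rw [if_pos h, List.isChain_cons_cons]
      simp; omega
    · rw [if_neg h, List.isChain_cons_cons]
      constructor
      · intro hm; exact ⟨by omega, (ih d).mp hm⟩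
      · intro ⟨_, hc⟩; exact (ih d).mpr hc

-- B's sorted-copy comparison is the same chain test
theorem sorted_rev_eq_iff_chain (l : List Int) :
    (l = PySem.List.sorted l (fun x => x) true) ↔ List.IsChain (fun a b : Int => b ≤ a) l := by
  constructor
  · intro h
    have hp := PySem.List.sorted_pairwise_rev (xs := l) (key := fun x : Int => x)
    rw [← h] at hp
    exact List.isChain_iff_pairwise.mpr hp
  · intro hc
    have hp : l.Pairwise (fun a b : Int => b ≤ a) := List.IsChain.pairwise hc
    have hs := PySem.List.sorted_rev_eq_self_of_pairwise (xs := l) (key := fun x : Int => x) hp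
    exact hs.symm

-- any adjacent pair equal (spec shared by the two non-strict tests)
def adjB : List Int → Bool
  | a :: b :: t => a == b || adjB (b :: t)
  | _ => false

-- A's second loop, non-strict case
theorem consecLoopA_false_eq_adj (l : List Int) : ∀ last, consecLoopA false last 1 l = adjB (last :: l) := by
  induction l with
  | nil => intro last; simp [consecLoopA, adjB]
  | cons d ds ih =>
    intro last
    rw [consecLoopA, adjB]
    by_cases h : d = last
    · subst h; simp
    · have h1 : (d == last) = false := by simp [h]
      have h2 : (last == d) = false := by simp [Ne.symm h]
      rw [h1, h2]
      simpa using ih d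

-- a run-length list of a nonempty list is nonempty with positive head
theorem runLengthsB_cons (a : Int) (t : List Int) :
    ∃ c cs, runLengthsB (a :: t) = c :: cs ∧ 1 ≤ c := by
  induction t generalizing a with
  | nil => exact ⟨1, [], rfl, le_refl 1⟩
  | cons b t' ih =>
    obtain ⟨c, cs, hbc, hc⟩ := ih b
    rw [runLengthsB, hbc]
    by_cases h : a = b
    · exact ⟨c + 1, cs, by simp [h], by omega⟩
    · exact ⟨1, c :: cs, by simp [h], le_refl 1⟩

-- B's non-strict test
theorem runLengthsB_any_eq_adj (l : List Int) :
    (runLengthsB l).any (fun c => decide (2 ≤ c)) = adjB l := by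
  match l with
  | [] => rfl
  | [_] => simp [runLengthsB, adjB]
  | a :: b :: t =>
    obtain ⟨c, cs, hbc, hc⟩ := runLengthsB_cons b t
    have ih := runLengthsB_any_eq_adj (b :: t)
    rw [runLengthsB, hbc, adjB]
    by_cases h : a = b
    · simp only [h, beq_self_eq_true, if_pos, Bool.true_or, List.any_cons]
      have : decide (2 ≤ c + 1) = true := by simp; omega
      simp [this]
    · have h1 : (a == b) = false := by simp [h]
      rw [h1, ← ih, hbc]
      simp

-- invariant for A's second loop in the strict case: count carries the length of the
-- current run seen so far (the current digit counted once)
theorem consecLoopA_true_inv (l : List Int) : ∀ last c,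
    consecLoopA true last c l =
      (match runLengthsB (last :: l) with
       | r :: rs => (c + r - 1 == 2) || rs.contains 2
       | [] => false) := by
  induction l with
  | nil =>
    intro last c
    simp only [consecLoopA, runLengthsB]
    have : c + 1 - 1 = c := by omega
    simp [this]
  | cons d ds ih =>
    intro last c
    obtain ⟨r, rs, hdr, hr⟩ := runLengthsB_cons d ds
    rw [consecLoopA, runLengthsB, hdr]
    by_cases h : d = last
    · subst h
      simp only [beq_self_eq_true, if_pos, Bool.not_true, Bool.false_and, Bool.false_eq_true,
        if_false]
      rw [ih d (c + 1), hdr]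
      have : c + 1 + r - 1 = c + (r + 1) - 1 := by omega
      simp [this]
    · have h1 : (d == last) = false := by simp [h]
      have h2 : (last == d) = false := by simp [Ne.symm h]
      rw [h1, h2]
      simp only [Bool.false_eq_true, if_false]
      by_cases hc : c = 2
      · subst hc
        simp
      · have hc1 : (c == 2) = false := by simp [hc]
        have hc2 : (c + 1 - 1 == 2) = false := by
          have : c + 1 - 1 = c := by omega
          simp [this, hc]
        rw [hc1]
        simp only [Bool.false_eq_true, if_false]
        rw [ih d 1, hdr]
        have h3 : (1 : Int) + r - 1 = r := by omega
        by_cases hx : r = 2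
        · simp [hc1, hx]
        · have e1 : (r == 2) = false := by simp [hx]
          have e2 : decide (2 = r) = false := by simp [Ne.symm hx]
          simp [h3, hc1, e1, e2]

-- A's second loop, strict case
theorem consecLoopA_true_eq_contains (last : Int) (l : List Int) :
    consecLoopA true last 1 l = (runLengthsB (last :: l)).contains 2 := by
  obtain ⟨r, rs, hdr, hr⟩ := runLengthsB_cons last l
  rw [consecLoopA_true_inv, hdr]
  have h3 : (1 : Int) + r - 1 = r := by omega
  by_cases hx : r = 2
  · simp [hx]
  · have e1 : (r == 2) = false := by simp [hx]
    have e2 : decide (2 = r) = false := by simp [Ne.symm hx]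
    simp [h3, e1, e2]

-- ===== VERDICT (by name: the statement is the Claim_ definition above) =====
theorem code_is_valid_spec : Claim_equal_code_is_valid := by
  intro n strict _
  unfold Spec_code_is_valid code_is_valid code_is_valid_alt
  by_cases hrange : 100000 ≤ n ∧ n < 1000000
  · rw [if_neg (by simp [hrange]), if_neg (by simp [hrange])]
    rw [digitsLsb_eq_genDigits]
    have hpos : 0 < n := by omega
    rcases hl : genDigits n with _ | ⟨d0, rest⟩
    · exact absurd hl (genDigits_ne_nil n hpos)
    · simp only
      by_cases hmono : monoLoopA d0 rest = true
      · have hchain := (monoLoopA_eq_chain rest d0).mp hmono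
        have hsorted : (d0 :: rest) = PySem.List.sorted (d0 :: rest) (fun x => x) true :=
          (sorted_rev_eq_iff_chain (d0 :: rest)).mpr hchain
        rw [hmono]
        simp only [Bool.not_true]
        rw [if_neg (by simp : ¬ (false = true)), if_neg (fun hne => hne hsorted)]
        cases strict
        · rw [consecLoopA_false_eq_adj, ← runLengthsB_any_eq_adj]
          simp
        · rw [consecLoopA_true_eq_contains]
          simp
      · have hchain : ¬ List.IsChain (fun a b : Int => b ≤ a) (d0 :: rest) := fun hc =>
          hmono ((monoLoopA_eq_chain rest d0).mpr hc)
        have hsorted : (d0 :: rest) ≠ PySem.List.sorted (d0 :: rest) (fun x => x) true := fun h =>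
          hchain ((sorted_rev_eq_iff_chain (d0 :: rest)).mp h)
        rw [Bool.not_eq_true] at hmono
        rw [hmono]
        simp only [Bool.not_false]
        rw [if_pos trivial, if_pos hsorted]
  · rw [if_pos hrange, if_pos hrange]
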